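-- pv_equiv track=rewrite | github.com/bbr88/tabdump | core/renderer/rendering.py | _group_oneoffs_by_kind
-- ===== SOURCE A (Python) =====
-- from typing import Dict, List, Tuple
--
-- def _kind_display_label(kind: str) -> str:
--     k = (kind or "").lower()
--     if k == "docs":
--         return "Docs"
--     if k == "article":
--         return "Articles"
--     if k == "paper":
--         return "Papers"
--     if k == "music":
--         return "Music"
--     if k == "spec":
--         return "Specs"
--     return "Other"
--
-- def _group_oneoffs_by_kind(flat_singletons: List[Tuple[str, dict]]) -> List[Tuple[str, List[Tuple[str, dict]]]]:
--     grouped: Dict[str, List[Tuple[str, dict]]] = {}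
--     for source_domain, it in flat_singletons:
--         label = _kind_display_label(it.get("kind") or "")
--         grouped.setdefault(label, []).append((source_domain, it))
--
--     order = ["Docs", "Articles", "Papers", "Music", "Specs", "Other"]
--     result: List[Tuple[str, List[Tuple[str, dict]]]] = []
--     for label in order:
--         arr = grouped.get(label, [])
--         if not arr:
--             continue
--         arr_sorted = sorted(
--             arr,
--             key=lambda pair: (
--                 (
--                     pair[1].get("canonical_title")
--                     or pair[1].get("title_render")
--                     or pair[1].get("title")
--                     or ""
--                 ).lower(),
--                 pair[0].lower(),
--                 pair[1].get("url") or "",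
--             ),
--         )
--         result.append((label, arr_sorted))
--     return result
-- ===== SOURCE B (Python) =====
-- # B: one global stable sort by a composite key (label-rank, title, domain, url),
-- # then split the sorted list into consecutive same-label runs.
--
-- _ORDER = ["Docs", "Articles", "Papers", "Music", "Specs", "Other"]
-- _KIND_LABELS = {"docs": "Docs", "article": "Articles", "paper": "Papers",
--                 "music": "Music", "spec": "Specs"}
--
--
-- def _label_of(it):
--     return _KIND_LABELS.get((it.get("kind") or "").lower(), "Other")
--
--
-- def _sort_key(pair):
--     source_domain, it = pair
--     title = (it.get("canonical_title") or it.get("title_render")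
--              or it.get("title") or "")
--     return (_ORDER.index(_label_of(it)), title.lower(),
--             source_domain.lower(), it.get("url") or "")
--
--
-- def _runs(ys):
--     if not ys:
--         return []
--     lbl = _label_of(ys[0][1])
--     k = 1
--     while k < len(ys) and _label_of(ys[k][1]) == lbl:
--         k += 1
--     return [(lbl, ys[:k])] + _runs(ys[k:])
--
--
-- def _group_oneoffs_by_kind(flat_singletons):
--     return _runs(sorted(flat_singletons, key=_sort_key))
-- ===== Notes on version B (the rewrite author's own statement) =====
-- stated objective: alternative
-- what changed: Instead of bucketing into a dict keyed by label and sorting each bucket separately, B performs one global stable sort by a composite key (label rank, title, domain, url) and then segments the sorted list into consecutive same-label runs.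
import Mathlib
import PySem

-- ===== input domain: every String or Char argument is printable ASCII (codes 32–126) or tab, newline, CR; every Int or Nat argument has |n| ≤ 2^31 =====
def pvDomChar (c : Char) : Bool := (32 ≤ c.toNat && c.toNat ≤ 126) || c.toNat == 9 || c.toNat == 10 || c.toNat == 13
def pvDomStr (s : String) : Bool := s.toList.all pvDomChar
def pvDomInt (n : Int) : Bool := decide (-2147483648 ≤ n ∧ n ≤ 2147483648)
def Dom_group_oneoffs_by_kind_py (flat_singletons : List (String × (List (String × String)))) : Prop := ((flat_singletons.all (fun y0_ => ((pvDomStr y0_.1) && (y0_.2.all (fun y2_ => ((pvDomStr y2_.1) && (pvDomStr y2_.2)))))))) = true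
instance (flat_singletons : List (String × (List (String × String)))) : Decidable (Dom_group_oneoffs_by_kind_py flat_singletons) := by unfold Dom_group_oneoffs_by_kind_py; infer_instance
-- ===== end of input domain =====

-- B replaces A's dict-bucketing + per-bucket sorts by ONE global stable sort on a
-- composite (label-rank, title, domain, url) key followed by run segmentation (objective: alternative).

-- ===== PORT A =====

-- `x or d` on an optional string (None and "" are falsy)
def pyOrStr (o : Option String) (d : String) : String :=
  match o with
  | none => d
  | some s => if s == "" then d else s

def kindDisplayLabel (kind : String) : String :=
  let k := PySem.Str.lower kind   -- `(kind or "")` = `kind` for a str argument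
  if k == "docs" then "Docs"
  else if k == "article" then "Articles"
  else if k == "paper" then "Papers"
  else if k == "music" then "Music"
  else if k == "spec" then "Specs"
  else "Other"

-- the tuple sort key of A's per-bucket sorted(...), encoded as ONE string: the components
-- are joined by NUL, which sorts strictly below every character the input domain admits
-- (codes 9/10/13/32..126), so String order = Python's tuple order — exact on that domain
def sortKeyA (pair : String × (List (String × String))) : String :=
  PySem.Str.lower (pyOrStr (PySem.Dict.get? (PySem.Dict.mk pair.2) "canonical_title")
           (pyOrStr (PySem.Dict.get? (PySem.Dict.mk pair.2) "title_render")
             (pyOrStr (PySem.Dict.get? (PySem.Dict.mk pair.2) "title") "")))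
    ++ "\x00" ++ PySem.Str.lower pair.1
    ++ "\x00" ++ pyOrStr (PySem.Dict.get? (PySem.Dict.mk pair.2) "url") ""

def orderA : List String := ["Docs", "Articles", "Papers", "Music", "Specs", "Other"]

def group_oneoffs_by_kind_py (flat_singletons : List (String × (List (String × String)))) : List (String × (List (String × (List (String × String))))) :=
  let grouped : PySem.Dict String (List (String × (List (String × String)))) :=
    flat_singletons.foldl (fun g p =>
      let label := kindDisplayLabel (pyOrStr (PySem.Dict.get? (PySem.Dict.mk p.2) "kind") "")
      PySem.Dict.insert g label (PySem.Dict.getD g label [] ++ [p])) PySem.Dict.empty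
  orderA.foldl (fun result label =>
    let arr := PySem.Dict.getD grouped label []
    if arr == [] then result
    else result ++ [(label, PySem.List.sorted arr sortKeyA)]) []

-- ===== PORT B =====

def kindLabelsB : PySem.Dict String String := PySem.Dict.mk
  [("docs", "Docs"), ("article", "Articles"), ("paper", "Papers"),
   ("music", "Music"), ("spec", "Specs")]

def orderB : List String := ["Docs", "Articles", "Papers", "Music", "Specs", "Other"]

def labelOfB (it : List (String × String)) : String :=
  PySem.Dict.getD kindLabelsB (PySem.Str.lower (pyOrStr (PySem.Dict.get? (PySem.Dict.mk it) "kind") "")) "Other"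

-- composite key (_ORDER.index(label), title.lower(), domain.lower(), url), string-encoded
-- like sortKeyA: the label rank 0..5 becomes a leading character below NUL's successors,
-- compared only against other rank characters — exact on the printable-ASCII domain;
-- the label is always an element of _ORDER, so `.index` never raises (.getD 0 never taken)
def sortKeyB (pair : String × (List (String × String))) : String :=
  String.singleton (Char.ofNat ((PySem.List.index? orderB (labelOfB pair.2)).getD 0)) ++
    (PySem.Str.lower (pyOrStr (PySem.Dict.get? (PySem.Dict.mk pair.2) "canonical_title")
             (pyOrStr (PySem.Dict.get? (PySem.Dict.mk pair.2) "title_render")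
               (pyOrStr (PySem.Dict.get? (PySem.Dict.mk pair.2) "title") "")))
      ++ "\x00" ++ PySem.Str.lower pair.1
      ++ "\x00" ++ pyOrStr (PySem.Dict.get? (PySem.Dict.mk pair.2) "url") "")

-- split the sorted list into consecutive runs of equal label (the while-loop scan of Source B)
def runsB : List (String × (List (String × String))) → List (String × (List (String × (List (String × String)))))
  | [] => []
  | p :: rest =>
    let lbl := labelOfB p.2
    (lbl, p :: rest.takeWhile (fun q => labelOfB q.2 == lbl)) ::
      runsB (rest.dropWhile (fun q => labelOfB q.2 == lbl))
  termination_by ys => ys.length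
  decreasing_by
    simpa using Nat.lt_succ_of_le (List.length_dropWhile_le _ _)

def group_oneoffs_by_kind_py_alt (flat_singletons : List (String × (List (String × String)))) : List (String × (List (String × (List (String × String))))) :=
  runsB (PySem.List.sorted flat_singletons sortKeyB)

-- ===== PRECONDITION & SPEC =====
def Spec_group_oneoffs_by_kind_py (flat_singletons : List (String × (List (String × String)))) (out : List (String × (List (String × (List (String × String)))))) : Prop := out = group_oneoffs_by_kind_py_alt flat_singletons
instance (flat_singletons : List (String × (List (String × String)))) (out : List (String × (List (String × (List (String × String)))))) : Decidable (Spec_group_oneoffs_by_kind_py flat_singletons out) := by unfold Spec_group_oneoffs_by_kind_py; infer_instance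

-- ===== CLAIM (what is proved, stated in full; the proofs are below) =====
def Claim_equal_group_oneoffs_by_kind_py : Prop := ∀ (flat_singletons : List (String × (List (String × String)))), Dom_group_oneoffs_by_kind_py flat_singletons → Spec_group_oneoffs_by_kind_py flat_singletons (group_oneoffs_by_kind_py flat_singletons)

-- ===== LEMMAS AND PROOFS =====

-- abbreviations used only by the proofs
def labA (p : String × (List (String × String))) : String :=
  kindDisplayLabel (pyOrStr (PySem.Dict.get? (PySem.Dict.mk p.2) "kind") "")

def idxA (l : String) : Nat := (PySem.List.index? orderA l).getD 0

def filtL (xs : List (String × (List (String × String)))) (l : String) : List (String × (List (String × String))) :=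
  xs.filter (fun p => labA p == l)

def blocksL (xs : List (String × (List (String × String)))) : List (String × (List (String × (List (String × String))))) :=
  orderA.map (fun l => (l, PySem.List.sorted (filtL xs l) sortKeyA))

theorem kindTable_eq (k : String) : PySem.Dict.getD kindLabelsB k "Other" =
    (if k == "docs" then "Docs"
     else if k == "article" then "Articles"
     else if k == "paper" then "Papers"
     else if k == "music" then "Music"
     else if k == "spec" then "Specs"
     else "Other") := by
  simp only [kindLabelsB, PySem.Dict.getD, PySem.Dict.get?_mk_cons, beq_iff_eq]
  simp only [eq_comm, PySem.Dict.get?, List.find?]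
  split_ifs <;> rfl

theorem labelOfB_eq (p : String × (List (String × String))) : labelOfB p.2 = labA p := by
  unfold labelOfB labA
  rw [kindTable_eq]
  rfl

theorem labA_mem (p : String × (List (String × String))) : labA p ∈ orderA := by
  unfold labA orderA
  simp only [kindDisplayLabel]
  split_ifs <;> simp

theorem sortKeyB_eq (p : String × (List (String × String))) :
    sortKeyB p = String.singleton (Char.ofNat (idxA (labA p))) ++ sortKeyA p := by
  unfold sortKeyB sortKeyA idxA
  rw [labelOfB_eq, show orderB = orderA from rfl]

theorem getD_empty (l : String) :
    PySem.Dict.getD (PySem.Dict.empty : PySem.Dict String (List (String × (List (String × String))))) l [] = [] := by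
  simp [PySem.Dict.getD, PySem.Dict.get?, PySem.Dict.empty]

theorem grouped_getD (xs : List (String × (List (String × String))))
    (g : PySem.Dict String (List (String × (List (String × String))))) (l : String) :
    PySem.Dict.getD (xs.foldl (fun g p =>
        PySem.Dict.insert g (labA p) (PySem.Dict.getD g (labA p) [] ++ [p])) g) l []
      = PySem.Dict.getD g l [] ++ filtL xs l := by
  induction xs generalizing g with
  | nil => simp [filtL]
  | cons p xs ih =>
    rw [List.foldl_cons, ih]
    rw [PySem.Dict.getD_insert]
    by_cases h : labA p = l
    · simp [filtL, h, List.append_assoc]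
    · have : ¬ l = labA p := fun e => h e.symm
      simp [filtL, h, this]

theorem foldA (f : String → List (String × (List (String × String))))
    (L : List String) (acc : List (String × (List (String × (List (String × String)))))) :
    L.foldl (fun res l => if f l == [] then res
        else res ++ [(l, PySem.List.sorted (f l) sortKeyA)]) acc
      = acc ++ (L.map (fun l => (l, PySem.List.sorted (f l) sortKeyA))).filter
          (fun lb => !(lb.2 == [])) := by
  induction L generalizing acc with
  | nil => simp
  | cons l L ih =>
    rw [List.foldl_cons, ih, List.map_cons, List.filter_cons]
    by_cases h : f l = []
    · simp [h, PySem.List.sorted_eq_nil_iff]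
    · have hs : ¬ PySem.List.sorted (f l) sortKeyA = [] := by
        rw [PySem.List.sorted_eq_nil_iff]; exact h
      simp [h, hs]

theorem A_eq_canon (xs : List (String × (List (String × String)))) :
    group_oneoffs_by_kind_py xs = (blocksL xs).filter (fun lb => !(lb.2 == [])) := by
  show orderA.foldl (fun result label =>
      let arr := PySem.Dict.getD (xs.foldl (fun g p =>
        PySem.Dict.insert g (labA p) (PySem.Dict.getD g (labA p) [] ++ [p])) PySem.Dict.empty) label []
      if arr == [] then result
      else result ++ [(label, PySem.List.sorted arr sortKeyA)]) []
    = (blocksL xs).filter (fun lb => !(lb.2 == []))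
  rw [foldA (fun l => PySem.Dict.getD (xs.foldl (fun g p =>
        PySem.Dict.insert g (labA p) (PySem.Dict.getD g (labA p) [] ++ [p])) PySem.Dict.empty) l [])]
  rw [List.nil_append]
  congr 1
  unfold blocksL
  apply List.map_congr_left
  intro l _
  rw [grouped_getD, getD_empty, List.nil_append]

-- insertBy passes over a prefix none of whose elements trigger the insertion test
theorem ins_pass {α : Type} (bf : α → α → Bool) (x : α) (u v : List α)
    (h : ∀ y ∈ u, bf x y = false) :
    PySem.List.insertBy bf x (u ++ v) = u ++ PySem.List.insertBy bf x v := by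
  induction u with
  | nil => simp
  | cons a u ih =>
    simp only [List.cons_append, PySem.List.insertBy, h a (by simp)]
    simp only [Bool.false_eq_true, if_false, List.cons.injEq, true_and]
    exact ih (fun y hy => h y (by simp [hy]))

-- insertBy lands inside u (where bf agrees with bg) because everything in v compares greater
theorem ins_here {α : Type} (bf bg : α → α → Bool) (x : α) (u v : List α)
    (hu : ∀ y ∈ u, bf x y = bg x y) (hv : ∀ y ∈ v, bf x y = true) :
    PySem.List.insertBy bf x (u ++ v) = PySem.List.insertBy bg x u ++ v := by
  induction u with
  | nil =>
    cases v with
    | nil => rfl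
    | cons a w => simp [PySem.List.insertBy, hv a (by simp)]
  | cons a u ih =>
    have ha := hu a (by simp)
    simp only [List.cons_append, PySem.List.insertBy, ha]
    by_cases h : bg x a = true
    · simp [h]
    · simp only [Bool.not_eq_true] at h
      simp only [h, Bool.false_eq_true, if_false, List.cons_append, List.cons.injEq, true_and]
      exact ih (fun y hy => hu y (by simp [hy]))

theorem mem_block (xs : List (String × (List (String × String)))) (l : String)
    (y : String × (List (String × String)))
    (h : y ∈ PySem.List.sorted (filtL xs l) sortKeyA) : labA y = l := by
  have := (PySem.List.mem_sorted _ _ _ _).1 h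
  simp only [filtL, List.mem_filter, beq_iff_eq] at this
  exact this.2

-- comparing two strings that each start with one explicit character
theorem singleton_append_lt (c d : Char) (s t : String) :
    (String.singleton c ++ s) < (String.singleton d ++ t) ↔ (c < d ∨ (c = d ∧ s < t)) := by
  rw [String.lt_iff_toList_lt, String.lt_iff_toList_lt]
  simp [List.cons_lt_cons_iff]

theorem bf_false (x y : String × (List (String × String)))
    (h : Char.ofNat (idxA (labA y)) < Char.ofNat (idxA (labA x))) :
    (decide (sortKeyB x < sortKeyB y)) = false := by
  simp only [sortKeyB_eq, decide_eq_false_iff_not, singleton_append_lt]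
  rintro (h1 | ⟨h1, -⟩)
  · exact absurd h (lt_asymm h1)
  · rw [h1] at h; exact lt_irrefl _ h

theorem bf_true (x y : String × (List (String × String)))
    (h : Char.ofNat (idxA (labA x)) < Char.ofNat (idxA (labA y))) :
    (decide (sortKeyB x < sortKeyB y)) = true := by
  simp only [decide_eq_true_eq, sortKeyB_eq, singleton_append_lt]
  exact Or.inl h

theorem bf_tie (x y : String × (List (String × String))) (h : labA x = labA y) :
    (decide (sortKeyB x < sortKeyB y)) = (decide (sortKeyA x < sortKeyA y)) := by
  apply Bool.decide_congr
  simp only [sortKeyB_eq, singleton_append_lt, h]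
  constructor
  · rintro (h1 | ⟨-, h2⟩)
    · exact absurd h1 (lt_irrefl _)
    · exact h2
  · exact fun h2 => Or.inr ⟨by trivial, h2⟩

theorem sorted_snoc {α κ : Type} [LT κ] [DecidableLT κ] (xs : List α) (x : α) (key : α → κ) :
    PySem.List.sorted (xs ++ [x]) key
      = PySem.List.insertBy (fun a b => decide (key a < key b)) x (PySem.List.sorted xs key) := by
  rw [PySem.List.sorted_eq_foldl_insertBy, PySem.List.sorted_eq_foldl_insertBy, List.foldl_append]
  rfl

theorem filtL_snoc (xs : List (String × (List (String × String))))
    (x : String × (List (String × String))) (l : String) :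
    filtL (xs ++ [x]) l = filtL xs l ++ (if labA x = l then [x] else []) := by
  simp only [filtL, List.filter_append]
  by_cases h : labA x = l <;> simp [h]

-- one step of the reverse induction: insert x into the block of its own label
set_option maxHeartbeats 2000000 in
theorem step_case (xs : List (String × (List (String × String))))
    (x : String × (List (String × String))) (pre post : List String)
    (hsplit : orderA = pre ++ labA x :: post)
    (hpre : ∀ l ∈ pre, Char.ofNat (idxA l) < Char.ofNat (idxA (labA x)))
    (hpost : ∀ l ∈ post, Char.ofNat (idxA (labA x)) < Char.ofNat (idxA l)) :
    PySem.List.insertBy (fun a b => decide (sortKeyB a < sortKeyB b)) x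
        ((blocksL xs).flatMap (·.2))
      = (blocksL (xs ++ [x])).flatMap (·.2) := by
  have hprene : ∀ l ∈ pre, ¬ (labA x = l) := by
    intro l hl he; have := hpre l hl; rw [he] at this; exact lt_irrefl _ this
  have hpostne : ∀ l ∈ post, ¬ (labA x = l) := by
    intro l hl he; have := hpost l hl; rw [he] at this; exact lt_irrefl _ this
  unfold blocksL
  rw [hsplit]
  simp only [List.map_append, List.map_cons, List.flatMap_append, List.flatMap_cons]
  have hfalse : ∀ y ∈ (pre.map fun l => (l, PySem.List.sorted (filtL xs l) sortKeyA)).flatMap (·.2),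
      (fun a b => decide (sortKeyB a < sortKeyB b)) x y = false := by
    intro y hy
    simp only [List.mem_flatMap, List.mem_map] at hy
    obtain ⟨lb, ⟨l, hl, rfl⟩, hy⟩ := hy
    exact bf_false x y (by rw [mem_block xs l y hy]; exact hpre l hl)
  rw [ins_pass _ _ _ _ hfalse]
  have htie : ∀ y ∈ PySem.List.sorted (filtL xs (labA x)) sortKeyA,
      (fun a b => decide (sortKeyB a < sortKeyB b)) x y
        = (fun a b => decide (sortKeyA a < sortKeyA b)) x y := by
    intro y hy
    exact bf_tie x y (by rw [mem_block xs (labA x) y hy])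
  have htrue : ∀ y ∈ (post.map fun l => (l, PySem.List.sorted (filtL xs l) sortKeyA)).flatMap (·.2),
      (fun a b => decide (sortKeyB a < sortKeyB b)) x y = true := by
    intro y hy
    simp only [List.mem_flatMap, List.mem_map] at hy
    obtain ⟨lb, ⟨l, hl, rfl⟩, hy⟩ := hy
    exact bf_true x y (by rw [mem_block xs l y hy]; exact hpost l hl)
  rw [ins_here (fun a b => decide (sortKeyB a < sortKeyB b)) (fun a b => decide (sortKeyA a < sortKeyA b)) x _ _ htie htrue]
  have hpreEq : pre.map (fun l => (l, PySem.List.sorted (filtL (xs ++ [x]) l) sortKeyA))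
      = pre.map (fun l => (l, PySem.List.sorted (filtL xs l) sortKeyA)) := by
    apply List.map_congr_left
    intro l hl
    rw [filtL_snoc, if_neg (hprene l hl), List.append_nil]
  have hpostEq : post.map (fun l => (l, PySem.List.sorted (filtL (xs ++ [x]) l) sortKeyA))
      = post.map (fun l => (l, PySem.List.sorted (filtL xs l) sortKeyA)) := by
    apply List.map_congr_left
    intro l hl
    rw [filtL_snoc, if_neg (hpostne l hl), List.append_nil]
  have hmid : PySem.List.sorted (filtL (xs ++ [x]) (labA x)) sortKeyA
      = PySem.List.insertBy (fun a b => decide (sortKeyA a < sortKeyA b)) x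
          (PySem.List.sorted (filtL xs (labA x)) sortKeyA) := by
    rw [filtL_snoc, if_pos rfl, sorted_snoc]
  rw [hpreEq, hpostEq, hmid]

theorem sorted_eq_flat_blocks (xs : List (String × (List (String × String)))) :
    PySem.List.sorted xs sortKeyB = (blocksL xs).flatMap (·.2) := by
  induction xs using List.reverseRecOn with
  | nil => simp [blocksL, orderA, filtL, PySem.List.sorted]
  | append_singleton xs x ih =>
    rw [sorted_snoc, ih]
    have hm := labA_mem x
    simp only [orderA, List.mem_cons, List.not_mem_nil, or_false] at hm
    rcases hm with h | h | h | h | h | h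
    · exact step_case xs x [] ["Articles", "Papers", "Music", "Specs", "Other"]
        (by rw [h]; rfl) (by simp) (by simp only [h, idxA]; decide)
    · exact step_case xs x ["Docs"] ["Papers", "Music", "Specs", "Other"]
        (by rw [h]; rfl) (by simp only [h, idxA]; decide) (by simp only [h, idxA]; decide)
    · exact step_case xs x ["Docs", "Articles"] ["Music", "Specs", "Other"]
        (by rw [h]; rfl) (by simp only [h, idxA]; decide) (by simp only [h, idxA]; decide)
    · exact step_case xs x ["Docs", "Articles", "Papers"] ["Specs", "Other"]
        (by rw [h]; rfl) (by simp only [h, idxA]; decide) (by simp only [h, idxA]; decide)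
    · exact step_case xs x ["Docs", "Articles", "Papers", "Music"] ["Other"]
        (by rw [h]; rfl) (by simp only [h, idxA]; decide) (by simp only [h, idxA]; decide)
    · exact step_case xs x ["Docs", "Articles", "Papers", "Music", "Specs"] []
        (by rw [h]; rfl) (by simp only [h, idxA]; decide) (by simp)

theorem tw_all {α : Type} (p : α → Bool) (u v : List α) (h : ∀ a ∈ u, p a = true) :
    (u ++ v).takeWhile p = u ++ v.takeWhile p := by
  induction u with
  | nil => simp
  | cons a u ih =>
    simp only [List.cons_append, List.takeWhile_cons, h a (by simp), if_true]
    exact congrArg (a :: ·) (ih (fun b hb => h b (by simp [hb])))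

theorem tw_nil {α : Type} (p : α → Bool) (v : List α) (h : ∀ a ∈ v, p a = false) :
    v.takeWhile p = [] := by
  cases v with
  | nil => rfl
  | cons a w => simp [h a (by simp)]

theorem dw_all {α : Type} (p : α → Bool) (u v : List α) (h : ∀ a ∈ u, p a = true) :
    (u ++ v).dropWhile p = v.dropWhile p := by
  induction u with
  | nil => simp
  | cons a u ih =>
    simp only [List.cons_append, List.dropWhile_cons, h a (by simp), if_true]
    exact ih (fun b hb => h b (by simp [hb]))

theorem dw_nil {α : Type} (p : α → Bool) (v : List α) (h : ∀ a ∈ v, p a = false) :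
    v.dropWhile p = v := by
  cases v with
  | nil => rfl
  | cons a w => simp [h a (by simp)]

theorem runs_flat (bs : List (String × (List (String × (List (String × String))))))
    (hhom : ∀ lb ∈ bs, ∀ p ∈ lb.2, labA p = lb.1)
    (hnd : (bs.map Prod.fst).Nodup) :
    runsB (bs.flatMap (·.2)) = bs.filter (fun lb => !(lb.2 == [])) := by
  induction bs with
  | nil => simp [runsB]
  | cons lb bs ih =>
    obtain ⟨l, b⟩ := lb
    have hndtail : (bs.map Prod.fst).Nodup := (List.nodup_cons.1 (by simpa using hnd)).2
    have hlnot : l ∉ bs.map Prod.fst := (List.nodup_cons.1 (by simpa using hnd)).1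
    have hhomtail : ∀ lb ∈ bs, ∀ p ∈ lb.2, labA p = lb.1 :=
      fun lb hlb => hhom lb (by simp [hlb])
    cases b with
    | nil =>
      simp only [List.flatMap_cons, List.nil_append, List.filter_cons]
      simpa using ih hhomtail hndtail
    | cons p t =>
      have hl : labA p = l := hhom (l, p :: t) (by simp) p (by simp)
      have hflat : ∀ q ∈ bs.flatMap (·.2), (labelOfB q.2 == labelOfB p.2) = false := by
        intro q hq
        simp only [List.mem_flatMap] at hq
        obtain ⟨lb', hlb', hq⟩ := hq
        have h1 : labA q = lb'.1 := hhomtail lb' hlb' q hq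
        have h2 : lb'.1 ≠ l := by
          intro he; exact hlnot (by rw [← he]; exact List.mem_map_of_mem hlb')
        simp [labelOfB_eq, h1, hl, h2]
      have ht : ∀ a ∈ t, (labelOfB a.2 == labelOfB p.2) = true := by
        intro a ha
        have : labA a = l := hhom (l, p :: t) (by simp) a (by simp [ha])
        simp [labelOfB_eq, this, hl]
      simp only [List.flatMap_cons, List.cons_append, runsB]
      rw [tw_all _ _ _ ht, tw_nil _ _ hflat, dw_all _ _ _ ht, dw_nil _ _ hflat,
        List.append_nil, List.filter_cons]
      have : (!((p :: t : List (String × (List (String × String)))) == [])) = true := by simp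
      rw [this]
      simp only [if_true]
      rw [labelOfB_eq, hl, ih hhomtail hndtail]

-- ===== VERDICT (by name: the statement is the Claim_ definition above) =====
theorem group_oneoffs_by_kind_py_spec : Claim_equal_group_oneoffs_by_kind_py := by
  intro xs _
  unfold Spec_group_oneoffs_by_kind_py group_oneoffs_by_kind_py_alt
  rw [A_eq_canon, sorted_eq_flat_blocks, runs_flat]
  · intro lb hlb p hp
    simp only [blocksL, List.mem_map] at hlb
    obtain ⟨l, hl, rfl⟩ := hlb
    have := (PySem.List.mem_sorted _ _ _ _).1 hp
    simp only [filtL, List.mem_filter, beq_iff_eq] at this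
    exact this.2
  · simp [blocksL, orderA]
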